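-- pv_equiv track=rewrite | github.com/naudhizb/CodingTest_BaekJoon | 17140.py | R_Calc
-- ===== SOURCE A (Python) =====
-- def get_count(l):
--     cnt = {}
--     for i in l:
--         if i not in cnt:
--             cnt[i] = 0
--         cnt[i] += 1
--     a = []
--     for k in cnt:
--         a.append((k, cnt[k]))
--
--     # [[number, count] ...]
--     return a
--
-- def R_Calc(ll):
--     # 1. 등장횟수 오름차순
--     # 2. 수가 커지는 순
--     ret = []
--     for i in ll:
--         cnt = get_count(list(filter(lambda x: x!=0, i)))
--         cnt.sort(key=lambda x:(x[1], x[0]))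
--         tmp = [item for sublist in cnt for item in sublist]
--         ret.append(tmp)
--     len_arr = [len(i) for i in ret]
--     max_len = max(len_arr)
--     for i in ret:
--         while len(i) < max_len:
--             i.append(0)
--     return ret
-- ===== SOURCE B (Python) =====
-- def R_Calc(ll):
--     rows = []
--     for row in ll:
--         vals = sorted(x for x in row if x != 0)
--         # run-length scan of the sorted row: two pointers, one linear sweep
--         runs = []
--         i = 0
--         n = len(vals)
--         while i < n:
--             v = vals[i]
--             j = i + 1
--             while j < n and vals[j] == v:
--                 j += 1
--             runs.append((v, j - i))
--             i = j
--         runs.sort(key=lambda p: (p[1], p[0]))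
--         rows.append([x for p in runs for x in p])
--     width = max(len(r) for r in rows)
--     return [r + [0] * (width - len(r)) for r in rows]
-- ===== Notes on version B (the rewrite author's own statement) =====
-- stated objective: alternative
-- what changed: Per-row frequencies are computed by sorting the nonzero values and run-length-scanning the sorted list with two pointers (sort-then-group) instead of A's hash-dict tally followed by a dict-items pass; rows are padded by list concatenation instead of A's in-place while-append loop.
import Mathlib
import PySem

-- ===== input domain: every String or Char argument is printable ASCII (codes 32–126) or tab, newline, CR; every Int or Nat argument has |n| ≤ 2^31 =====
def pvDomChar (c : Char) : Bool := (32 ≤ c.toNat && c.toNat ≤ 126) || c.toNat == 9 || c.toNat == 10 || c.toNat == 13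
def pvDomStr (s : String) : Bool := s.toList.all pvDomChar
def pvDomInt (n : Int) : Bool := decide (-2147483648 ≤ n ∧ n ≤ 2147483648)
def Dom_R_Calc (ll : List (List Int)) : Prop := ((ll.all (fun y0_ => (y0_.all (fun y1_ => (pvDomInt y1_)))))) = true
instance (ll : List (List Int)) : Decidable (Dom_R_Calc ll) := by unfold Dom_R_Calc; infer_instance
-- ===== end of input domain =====

-- B computes per-row frequencies by sorting the nonzero values and run-length-scanning
-- the sorted list with two pointers, instead of A's dict tally; padding is done by
-- concatenation instead of A's in-place while-append loop (alternative algorithm; A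
-- mutates only lists it created locally, so the return value is the observable behaviour).

-- ===== PORT A =====
-- dict counting loop: 'if i not in cnt: cnt[i] = 0' then 'cnt[i] += 1'; afterwards
-- 'for k in cnt: a.append((k, cnt[k]))' — cnt[k] is always present for k in cnt.keys,
-- so getD is exact there.
def get_count (l : List Int) : List (Int × Int) :=
  let cnt : PySem.Dict Int Int := l.foldl (fun cnt i =>
      let cnt := if cnt.contains i then cnt else cnt.insert i 0
      cnt.insert i (cnt.getD i 0 + 1)) PySem.Dict.empty
  cnt.keys.foldl (fun a k => a ++ [(k, cnt.getD k 0)]) []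

-- 'while len(i) < max_len: i.append(0)'
def padLoop (maxLen : Int) (i : List Int) : List Int :=
  if PySem.List.len i < maxLen then padLoop maxLen (i ++ [0]) else i
termination_by (maxLen - PySem.List.len i).toNat
decreasing_by
  simp only [PySem.List.len_eq, List.length_append, List.length_cons, List.length_nil] at *
  omega

def R_Calc (ll : List (List Int)) : List (List Int) :=
  let ret := ll.foldl (fun ret i =>
      let cnt := get_count (i.filter (fun x => x != 0))
      let cnt := PySem.List.sorted2 cnt (fun x => x.2) (fun x => x.1)
      let tmp := cnt.foldl (fun tmp s => tmp ++ [s.1, s.2]) []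
      ret ++ [tmp]) []
  let lenArr := ret.map (fun i => PySem.List.len i)
  -- max(len_arr): raises ValueError iff ll = [] — excluded by Pre_R_Calc
  let maxLen := (PySem.List.max? lenArr (fun x => x)).getD 0
  ret.map (fun i => padLoop maxLen i)

-- ===== PORT B =====
-- inner 'while j < n and vals[j] == v: j += 1'
def runEnd (vals : List Int) (v : Int) (j : Nat) : Nat :=
  if h : j < vals.length then
    (if vals[j] == v then runEnd vals v (j + 1) else j)
  else j
termination_by vals.length - j

-- the port's outer loop needs this to terminate, so it stays above the claim block
theorem runEnd_ge (vals : List Int) (v : Int) : ∀ j, j ≤ runEnd vals v j := by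
  have H : ∀ n j, vals.length - j ≤ n → j ≤ runEnd vals v j := by
    intro n
    induction n with
    | zero =>
      intro j hn
      rw [runEnd.eq_def]
      split
      · omega
      · exact le_refl j
    | succ n ih =>
      intro j hn
      rw [runEnd.eq_def]
      split
      · split
        · exact le_trans (Nat.le_succ j) (ih (j + 1) (by omega))
        · exact le_refl j
      · exact le_refl j
  intro j
  exact H (vals.length - j) j (le_refl _)

-- outer 'while i < n: … runs.append((v, j - i)); i = j'
def runScan (vals : List Int) (i : Nat) : List (Int × Int) :=
  if h : i < vals.length then
    let v := vals[i]
    let j := runEnd vals v (i + 1)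
    (v, (j : Int) - (i : Int)) :: runScan vals j
  else []
termination_by vals.length - i
decreasing_by
  have := runEnd_ge vals vals[i] (i + 1)
  omega

def R_Calc_alt (ll : List (List Int)) : List (List Int) :=
  let rows := ll.foldl (fun rows row =>
      let vals := PySem.List.sorted (row.filter (fun x => x != 0)) (fun v => v) false
      let runs := runScan vals 0
      let runs := PySem.List.sorted2 runs (fun p => p.2) (fun p => p.1)
      rows ++ [runs.flatMap (fun p => [p.1, p.2])]) []
  -- max(len(r) for r in rows): raises ValueError iff ll = [] — excluded by Pre_R_Calc
  let width := (PySem.List.max? (rows.map (fun r => PySem.List.len r)) (fun x => x)).getD 0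
  rows.map (fun r => r ++ PySem.List.pyRepeat [0] (width - PySem.List.len r))

-- ===== PRECONDITION & SPEC =====
-- Pre_ excludes only the empty outer list, on which A (and B alike) raise ValueError in max().
def Pre_R_Calc (ll : List (List Int)) : Prop := ll ≠ []
instance (ll : List (List Int)) : Decidable (Pre_R_Calc ll) := by unfold Pre_R_Calc; infer_instance
def pvWitness_R_Calc : List (List Int) := [[1, 2, 2, 0], [3]]

def Spec_R_Calc (ll : List (List Int)) (out : List (List Int)) : Prop := out = R_Calc_alt ll
instance (ll : List (List Int)) (out : List (List Int)) : Decidable (Spec_R_Calc ll out) := by unfold Spec_R_Calc; infer_instance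

-- ===== CLAIM (what is proved, stated in full; the proofs are below) =====
def Claim_equal_R_Calc : Prop := ∀ (ll : List (List Int)), Dom_R_Calc ll → Pre_R_Calc ll → Spec_R_Calc ll (R_Calc ll)

-- ===== LEMMAS AND PROOFS =====

-- the lexicographic (count, value) sort key, packaged as a single LinearOrder key
def lexKey (p : Int × Int) : Int ×ₗ Int := toLex (p.2, p.1)

theorem lexKey_injective : Function.Injective lexKey := by
  intro p q h
  have h2 : (p.2, p.1) = (q.2, q.1) := toLex.injective h
  exact Prod.ext (congrArg Prod.snd h2) (congrArg Prod.fst h2)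

-- sorted2 by (snd, fst) is sorted by the single lexicographic key
theorem sorted2_eq_sorted_lexKey (xs : List (Int × Int)) :
    PySem.List.sorted2 xs (fun p => p.2) (fun p => p.1) false
      = PySem.List.sorted xs lexKey false := by
  have hb : (fun (a b : Int × Int) =>
        decide (a.2 < b.2) || !decide (b.2 < a.2) && decide (a.1 < b.1))
      = (fun (a b : Int × Int) => decide (lexKey a < lexKey b)) := by
    funext a b
    simp only [lexKey, Prod.Lex.toLex_lt_toLex]
    by_cases h1 : a.2 < b.2 <;> by_cases h2 : b.2 < a.2 <;> by_cases h3 : a.1 < b.1 <;>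
      simp [h1, h2, h3] <;> omega
  rw [PySem.List.sorted_eq_foldl_insertBy]
  show xs.foldl (fun acc x => PySem.List.insertBy
      (fun (a b : Int × Int) =>
        decide (a.2 < b.2) || !decide (b.2 < a.2) && decide (a.1 < b.1)) x acc) [] = _
  rw [hb]

-- A's dict loop is the standard counter, and the items loop reads it off
theorem get_count_eq (l : List Int) :
    get_count l = (PySem.Set.ofList l).map (fun k => (k, (l.count k : Int))) := by
  have hstep : l.foldl (fun (cnt : PySem.Dict Int Int) i =>
      let cnt := if cnt.contains i then cnt else cnt.insert i 0
      cnt.insert i (cnt.getD i 0 + 1)) PySem.Dict.empty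
      = l.foldl (fun d x => d.insert x (d.getD x 0 + 1)) PySem.Dict.empty := by
    apply PySem.List.foldl_congr_mem
    intro d i _
    show (let cnt := if d.contains i then d else d.insert i 0
          cnt.insert i (cnt.getD i 0 + 1)) = d.insert i (d.getD i 0 + 1)
    by_cases h : d.contains i
    · simp only [h, if_true]
    · rw [Bool.not_eq_true] at h
      simp only [h, Bool.false_eq_true, if_false]
      rw [PySem.Dict.getD_insert_self, PySem.Dict.insert_insert_self]
      have h0 : d.getD i 0 = 0 := by simp [pysem, h]
      rw [h0]
  show ((l.foldl (fun (cnt : PySem.Dict Int Int) i =>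
      let cnt := if cnt.contains i then cnt else cnt.insert i 0
      cnt.insert i (cnt.getD i 0 + 1)) PySem.Dict.empty).keys).foldl
      (fun a k => a ++ [(k, (l.foldl (fun (cnt : PySem.Dict Int Int) i =>
        let cnt := if cnt.contains i then cnt else cnt.insert i 0
        cnt.insert i (cnt.getD i 0 + 1)) PySem.Dict.empty).getD k 0)]) [] = _
  rw [hstep, PySem.Dict.foldl_insert_getD_add_one_eq_counter,
    PySem.List.foldl_append_singleton_eq_map, List.nil_append, PySem.Dict.keys_counter]
  apply List.map_congr_left
  intro k _
  rw [PySem.Dict.getD_counter]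

-- the inner while loop advances to the end of the run of v values
theorem runEnd_spec (vals : List Int) (v : Int) :
    ∀ n j, vals.length - j ≤ n → j ≤ vals.length →
      runEnd vals v j = j + ((vals.drop j).takeWhile (fun x => x == v)).length := by
  intro n
  induction n with
  | zero =>
    intro j hn hj
    have hje : j = vals.length := by omega
    subst hje
    rw [runEnd.eq_def]
    simp
  | succ n ih =>
    intro j hn hj
    rw [runEnd.eq_def]
    by_cases h : j < vals.length
    · rw [dif_pos h]
      have hdrop : vals.drop j = vals[j] :: vals.drop (j + 1) := List.drop_eq_getElem_cons h
      by_cases hb : (vals[j] == v) = true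
      · rw [if_pos hb, ih (j + 1) (by omega) (by omega), hdrop, List.takeWhile_cons, hb]
        simp only [if_true, List.length_cons]
        omega
      · rw [if_neg hb, hdrop, List.takeWhile_cons]
        simp [hb]
    · rw [dif_neg h]
      have hje : j = vals.length := by omega
      subst hje
      simp

-- after the inner loop, the remaining suffix is the dropWhile of the run
theorem drop_runEnd (vals : List Int) (v : Int) :
    ∀ n j, vals.length - j ≤ n →
      vals.drop (runEnd vals v j) = (vals.drop j).dropWhile (fun x => x == v) := by
  intro n
  induction n with
  | zero =>
    intro j hn
    have hje : vals.length ≤ j := by omega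
    rw [runEnd.eq_def, dif_neg (by omega), List.drop_eq_nil_of_le hje]
    simp
  | succ n ih =>
    intro j hn
    rw [runEnd.eq_def]
    by_cases h : j < vals.length
    · rw [dif_pos h]
      have hdrop : vals.drop j = vals[j] :: vals.drop (j + 1) := List.drop_eq_getElem_cons h
      by_cases hb : (vals[j] == v) = true
      · rw [if_pos hb, ih (j + 1) (by omega), hdrop, List.dropWhile_cons, hb]
        simp
      · rw [if_neg hb, hdrop, List.dropWhile_cons]
        simp [hb, ← hdrop]
    · rw [dif_neg h, List.drop_eq_nil_of_le (by omega)]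
      simp

-- the run-length scan of a sorted suffix: counts are the multiplicities, keys are
-- exactly the distinct values, without repetition
theorem runScan_spec (vals : List Int) :
    ∀ n i, vals.length - i ≤ n → i ≤ vals.length → (vals.drop i).Pairwise (· ≤ ·) →
      (∀ p ∈ runScan vals i, p.2 = (((vals.drop i).count p.1 : Int)))
      ∧ ((runScan vals i).map Prod.fst).Nodup
      ∧ (∀ k, k ∈ (runScan vals i).map Prod.fst ↔ k ∈ vals.drop i) := by
  intro n
  induction n with
  | zero =>
    intro i hn hi hp
    have hie : i = vals.length := by omega
    rw [runScan.eq_def]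
    simp [hie]
  | succ n ih =>
    intro i hn hi hp
    by_cases h : i < vals.length
    · have hdrop : vals.drop i = vals[i] :: vals.drop (i + 1) := List.drop_eq_getElem_cons h
      set v := vals[i] with hv
      set t := vals.drop (i + 1) with ht
      set w := t.takeWhile (fun x => x == v) with hwdef
      set r := t.dropWhile (fun x => x == v) with hrdef
      have htlen : t.length = vals.length - (i + 1) := by rw [ht]; simp
      have hwr : w ++ r = t := List.takeWhile_append_dropWhile
      have hwlen : w.length ≤ t.length := by
        rw [← hwr]; simp
      have hj : runEnd vals v (i + 1) = i + 1 + w.length :=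
        runEnd_spec vals v (vals.length - (i + 1)) (i + 1) (le_refl _) (by omega)
      have hdropj : vals.drop (runEnd vals v (i + 1)) = r :=
        drop_runEnd vals v (vals.length - (i + 1)) (i + 1) (le_refl _)
      -- order facts
      have hpt : t.Pairwise (· ≤ ·) := by
        rw [hdrop] at hp; exact (List.pairwise_cons.1 hp).2
      have hvle : ∀ x ∈ t, v ≤ x := by
        rw [hdrop] at hp; exact (List.pairwise_cons.1 hp).1
      have hwv : ∀ x ∈ w, x = v := by
        intro x hx
        have := List.mem_takeWhile_imp hx
        simpa using this
      have hrt : ∀ x ∈ r, x ∈ t := fun x hx => (List.dropWhile_sublist _).subset hx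
      have hpr : r.Pairwise (· ≤ ·) := hpt.sublist (List.dropWhile_sublist _)
      have hvr : ∀ x ∈ r, v < x := by
        intro x hx
        cases hre : r with
        | nil => rw [hre] at hx; simp at hx
        | cons hd tl =>
          have hl : 0 < (t.dropWhile (fun x => x == v)).length := by
            rw [← hrdef, hre]; simp
          have hhd0 := List.dropWhile_get_zero_not (p := fun x => x == v) t hl
          have hget : (t.dropWhile (fun x => x == v)).get ⟨0, hl⟩ = hd := by
            have : t.dropWhile (fun x => x == v) = hd :: tl := by rw [← hrdef, hre]
            simp [this]
          rw [hget] at hhd0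
          have hhdne : hd ≠ v := by simpa using hhd0
          have hhdlt : v < hd :=
            lt_of_le_of_ne (hvle hd (hrt hd (by rw [hre]; simp))) (Ne.symm hhdne)
          rw [hre] at hx
          rcases List.mem_cons.1 hx with rfl | hx'
          · exact hhdlt
          · have hle : hd ≤ x := by
              rw [hre] at hpr
              exact (List.pairwise_cons.1 hpr).1 x hx'
            exact lt_of_lt_of_le hhdlt hle
      -- count facts
      have hcw : w.count v = w.length := by
        rw [List.count_eq_length]
        intro b hb
        exact (hwv b hb).symm
      have hcr0 : r.count v = 0 := by
        rw [List.count_eq_zero]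
        intro hmem
        exact absurd (hvr v hmem) (lt_irrefl v)
      have hcount_v : (vals.drop i).count v = w.length + 1 := by
        rw [hdrop, List.count_cons_self, ← hwr, List.count_append, hcw, hcr0]
      have hcount_k : ∀ k ∈ r, (vals.drop i).count k = r.count k := by
        intro k hk
        have hkv : k ≠ v := fun he => absurd (hvr k hk) (by rw [he]; exact lt_irrefl v)
        have hcwk : w.count k = 0 := by
          rw [List.count_eq_zero]
          intro hmem
          exact hkv (hwv k hmem)
        rw [hdrop, ← hwr]
        simp [List.count_cons, List.count_append, hcwk]
        exact fun he => hkv he.symm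
      -- recursive call
      obtain ⟨IH1, IH2, IH3⟩ := ih (runEnd vals v (i + 1))
        (by rw [hj]; omega) (by rw [hj]; omega) (by rw [hdropj]; exact hpr)
      rw [hdropj] at IH1 IH3
      -- unfold one step of runScan
      rw [runScan.eq_def, dif_pos h]
      refine ⟨?_, ?_, ?_⟩
      · intro p hpmem
        rcases List.mem_cons.1 hpmem with rfl | hpmem'
        · show ((runEnd vals v (i + 1) : Int) - (i : Int)) = _
          rw [hj, hcount_v]
          push_cast
          ring
        · have h1 := IH1 p hpmem'
          have h2 : p.1 ∈ r := (IH3 p.1).1 (List.mem_map_of_mem hpmem')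
          rw [h1, hcount_k p.1 h2]
      · rw [List.map_cons]
        refine List.nodup_cons.2 ⟨?_, IH2⟩
        intro hmem
        exact absurd (hvr v ((IH3 v).1 hmem)) (lt_irrefl v)
      · intro k
        rw [List.map_cons, List.mem_cons, IH3 k, hdrop, List.mem_cons, ← hwr,
          List.mem_append]
        constructor
        · rintro (rfl | hk)
          · exact Or.inl rfl
          · exact Or.inr (Or.inr hk)
        · rintro (rfl | hk | hk)
          · exact Or.inl rfl
          · exact Or.inl (hwv k hk)
          · exact Or.inr hk
    · have hie : i = vals.length := by omega
      rw [runScan.eq_def]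
      simp [hie]

-- B's run list is a permutation of A's dict-items pair list
theorem runs_perm (nz : List Int) :
    (runScan (PySem.List.sorted nz (fun v => v) false) 0).Perm
      ((PySem.Set.ofList nz).map (fun k => (k, (nz.count k : Int)))) := by
  set s := PySem.List.sorted nz (fun v => v) false with hs
  have hperm : s.Perm nz := PySem.List.sorted_perm nz (fun v => v) false
  have hsp : s.Pairwise (· ≤ ·) := by
    have := PySem.List.sorted_pairwise nz (fun v => v)
    simpa using this
  obtain ⟨H1, H2, H3⟩ := runScan_spec s s.length 0 (le_refl _) (Nat.zero_le _)
    (by simpa using hsp)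
  simp only [List.drop_zero] at H1 H3
  have hmap : runScan s 0
      = ((runScan s 0).map Prod.fst).map (fun k => (k, (nz.count k : Int))) := by
    rw [List.map_map]
    calc runScan s 0 = (runScan s 0).map id := (List.map_id _).symm
      _ = _ := by
        apply List.map_congr_left
        intro p hp
        have := H1 p hp
        have hc : s.count p.1 = nz.count p.1 := hperm.count_eq p.1
        rw [hc] at this
        show p = (p.1, (nz.count p.1 : Int))
        exact Prod.ext rfl this
  rw [hmap]
  apply List.Perm.map
  rw [List.perm_ext_iff_of_nodup H2 (PySem.Set.nodup_ofList nz)]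
  intro a
  rw [H3 a, PySem.Set.mem_ofList, hperm.mem_iff]

-- the per-row body of A equals the per-row body of B
theorem row_eq (i : List Int) :
    (PySem.List.sorted2 (get_count (i.filter (fun x => x != 0)))
        (fun x => x.2) (fun x => x.1)).foldl (fun tmp s => tmp ++ [s.1, s.2]) []
      = (PySem.List.sorted2
          (runScan (PySem.List.sorted (i.filter (fun x => x != 0)) (fun v => v) false) 0)
          (fun p => p.2) (fun p => p.1)).flatMap (fun p => [p.1, p.2]) := by
  rw [PySem.List.foldl_append_eq_flatMap, List.nil_append]
  congr 1
  rw [sorted2_eq_sorted_lexKey, sorted2_eq_sorted_lexKey, get_count_eq]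
  exact PySem.List.sorted_eq_sorted_of_perm _ _ lexKey lexKey_injective
    (runs_perm (i.filter (fun x => x != 0))).symm

-- the padding while-loop appends exactly the missing zeros
theorem padLoop_eq (m : Int) (r : List Int) :
    padLoop m r = r ++ List.replicate (m - PySem.List.len r).toNat 0 := by
  have H : ∀ (n : Nat) (r : List Int), (m - PySem.List.len r).toNat = n →
      padLoop m r = r ++ List.replicate n 0 := by
    intro n
    induction n with
    | zero =>
      intro r hn
      rw [padLoop.eq_def]
      have hge : ¬ ((r.length : Int) < m) := by
        simp only [PySem.List.len_eq] at hn; omega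
      simp [PySem.List.len_eq, hge]
    | succ n ih =>
      intro r hn
      rw [padLoop.eq_def]
      have hlt : PySem.List.len r < m := by
        simp only [PySem.List.len_eq] at hn ⊢; omega
      have hn' : (m - PySem.List.len (r ++ [0])).toNat = n := by
        simp only [PySem.List.len_eq, List.length_append, List.length_cons,
          List.length_nil] at hn ⊢
        omega
      rw [if_pos hlt, ih _ hn']
      simp [List.replicate_succ, List.append_assoc]
  exact H _ r rfl

-- ===== VERDICT (by name: the statement is the Claim_ definition above) =====
theorem R_Calc_spec : Claim_equal_R_Calc := by
  intro ll _ _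
  show R_Calc ll = R_Calc_alt ll
  simp only [R_Calc, R_Calc_alt]
  rw [PySem.List.foldl_append_singleton_eq_map, PySem.List.foldl_append_singleton_eq_map,
    List.nil_append, List.nil_append]
  have hrows : ll.map (fun i =>
      (PySem.List.sorted2 (get_count (i.filter (fun x => x != 0)))
        (fun x => x.2) (fun x => x.1)).foldl (fun tmp s => tmp ++ [s.1, s.2]) [])
      = ll.map (fun row =>
        (PySem.List.sorted2
          (runScan (PySem.List.sorted (row.filter (fun x => x != 0)) (fun v => v) false) 0)
          (fun p => p.2) (fun p => p.1)).flatMap (fun p => [p.1, p.2])) :=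
    List.map_congr_left (fun i _ => row_eq i)
  rw [hrows]
  apply List.map_congr_left
  intro r _
  rw [padLoop_eq, PySem.List.pyRepeat_singleton]
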